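-- pv_equiv track=rewrite | github.com/frankandreace/vg_assembly | assembler/rebuilder.py | get_cigar
-- ===== SOURCE A (Python) =====
-- def get_cigar(walked_in_read_bps: int, cs_line: list, read_id: str, walked_inside_anchor_bps: int):
--     """
--     It uses the parsed cs tag from the gaf to verify that the anchor and the path match at the sequence level.
--     """
--
--     # Reconstruct the read sequence from the CS tag
--     # We know we have walked `walked_in_read_bps` bases in the read, so use that to extract
--
--     anchor_end_bps = walked_in_read_bps + walked_inside_anchor_bps
--     cigar_string = ""
--     for symbol, bps in cs_line:
--         walked_in_read_bps -= bps
--         anchor_end_bps -= bps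
--         if walked_in_read_bps < 0:
--             start_index_inside_cs_tag = max(0, walked_in_read_bps+bps)
--             end_index_inside_cs_tag = min(bps, anchor_end_bps+bps)
--             cigar_string += (end_index_inside_cs_tag-start_index_inside_cs_tag)*symbol
--             if anchor_end_bps < 0:
--                 break
--
--     return(cigar_string)
-- ===== SOURCE B (Python) =====
-- def get_cigar(walked_in_read_bps: int, cs_line: list, read_id: str, walked_inside_anchor_bps: int):
--     """Prefix-sum / interval-overlap reformulation: each CS segment occupies
--     [c, c+bps) in read coordinates; the answer is the join of every covered
--     segment's overlap with [lo, hi)."""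
--     lo = walked_in_read_bps
--     hi = walked_in_read_bps + walked_inside_anchor_bps
--     # segment start coordinates (prefix sums of bps)
--     starts = [0]
--     for _, bps in cs_line:
--         starts.append(starts[-1] + bps)
--     # the scan covers everything up to (and including) the first segment whose
--     # end lies strictly past both lo and hi
--     k = len(cs_line)
--     for i in range(len(cs_line)):
--         if lo < starts[i + 1] and hi < starts[i + 1]:
--             k = i + 1
--             break
--     # each covered segment contributes its overlap with [lo, hi)
--     return "".join(
--         symbol * (min(bps, hi - c) - max(0, lo - c))
--         for (symbol, bps), c in zip(cs_line[:k], starts)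
--     )
-- ===== Notes on version B (the rewrite author's own statement) =====
-- stated objective: alternative
-- what changed: Replaces A's destructive counter-subtraction loop (mutating walked/anchor counters, a guard branch and an in-loop break appending via +=) by a prefix-sum formulation: compute segment start coordinates, find the cut-off segment, then join each covered segment's interval overlap with [lo, hi) computed by a pure closed-form per-segment formula.
import Mathlib
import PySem

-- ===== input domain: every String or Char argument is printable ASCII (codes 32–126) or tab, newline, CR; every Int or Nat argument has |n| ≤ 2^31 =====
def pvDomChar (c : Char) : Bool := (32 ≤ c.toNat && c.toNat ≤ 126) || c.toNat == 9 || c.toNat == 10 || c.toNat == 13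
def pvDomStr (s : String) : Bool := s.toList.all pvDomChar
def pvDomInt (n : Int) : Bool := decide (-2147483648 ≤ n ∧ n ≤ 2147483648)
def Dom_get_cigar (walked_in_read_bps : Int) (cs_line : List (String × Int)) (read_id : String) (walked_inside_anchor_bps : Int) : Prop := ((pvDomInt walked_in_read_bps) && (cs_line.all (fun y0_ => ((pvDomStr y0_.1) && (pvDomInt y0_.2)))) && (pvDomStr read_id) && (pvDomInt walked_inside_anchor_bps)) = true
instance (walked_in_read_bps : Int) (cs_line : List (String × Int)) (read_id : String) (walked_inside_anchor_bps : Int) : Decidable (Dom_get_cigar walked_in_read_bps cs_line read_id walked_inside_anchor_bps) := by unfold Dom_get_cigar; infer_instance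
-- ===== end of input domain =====

-- ===== PORT A =====
-- B differs from A by decomposition only (same cost): A mutates two counters downward with a
-- guard and an in-loop break; B precomputes prefix-sum segment coordinates, a cut index, and
-- joins pure per-segment interval overlaps.  (Python's  count*symbol  with count possibly <= 0
-- is ported exactly as PySem.List.pyRepeat on the code points; strings are built as List Char
-- and wrapped with String.mk at the end, per the PySem convention.)
def getCigarGoA : List (String × Int) → Int → Int → List Char → List Char
  | [], _, _, acc => acc
  | (symbol, bps) :: rest, w, e, acc =>
      let w' := w - bps
      let e' := e - bps
      if w' < 0 then
        let s := max 0 (w' + bps)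
        let t := min bps (e' + bps)
        let acc' := acc ++ PySem.List.pyRepeat symbol.toList (t - s)
        if e' < 0 then acc' else getCigarGoA rest w' e' acc'
      else getCigarGoA rest w' e' acc

def get_cigar (walked_in_read_bps : Int) (cs_line : List (String × Int)) (read_id : String) (walked_inside_anchor_bps : Int) : String :=
  String.mk (getCigarGoA cs_line walked_in_read_bps (walked_in_read_bps + walked_inside_anchor_bps) [])

-- ===== PORT B =====
-- `starts[1:]`: the loop  starts.append(starts[-1] + bps)
def altStarts (c : Int) : List (String × Int) → List Int
  | [] => []
  | (_, bps) :: rest => (c + bps) :: altStarts (c + bps) rest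

-- the loop computing k (index+1 of the first segment past both lo and hi, else len(cs_line))
def altK (lo hi : Int) : List Int → Nat
  | [] => 0
  | c :: rest => if lo < c ∧ hi < c then 1 else altK lo hi rest + 1

-- the "".join(... for ... in zip(...)) comprehension
def altJoin (lo hi : Int) : List ((String × Int) × Int) → List Char
  | [] => []
  | ((symbol, bps), c) :: rest =>
      PySem.List.pyRepeat symbol.toList (min bps (hi - c) - max 0 (lo - c)) ++ altJoin lo hi rest

def get_cigar_alt (walked_in_read_bps : Int) (cs_line : List (String × Int)) (read_id : String) (walked_inside_anchor_bps : Int) : String :=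
  let lo := walked_in_read_bps
  let hi := walked_in_read_bps + walked_inside_anchor_bps
  let k := altK lo hi (altStarts 0 cs_line)
  String.mk (altJoin lo hi (List.zip (cs_line.take k) ((0 : Int) :: altStarts 0 cs_line)))

-- ===== PRECONDITION & SPEC =====
def Spec_get_cigar (walked_in_read_bps : Int) (cs_line : List (String × Int)) (read_id : String) (walked_inside_anchor_bps : Int) (out : String) : Prop := out = get_cigar_alt walked_in_read_bps cs_line read_id walked_inside_anchor_bps
instance (walked_in_read_bps : Int) (cs_line : List (String × Int)) (read_id : String) (walked_inside_anchor_bps : Int) (out : String) : Decidable (Spec_get_cigar walked_in_read_bps cs_line read_id walked_inside_anchor_bps out) := by unfold Spec_get_cigar; infer_instance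

-- ===== CLAIM (what is proved, stated in full; the proofs are below) =====
def Claim_equal_get_cigar : Prop := ∀ (walked_in_read_bps : Int) (cs_line : List (String × Int)) (read_id : String) (walked_inside_anchor_bps : Int), Dom_get_cigar walked_in_read_bps cs_line read_id walked_inside_anchor_bps → Spec_get_cigar walked_in_read_bps cs_line read_id walked_inside_anchor_bps (get_cigar walked_in_read_bps cs_line read_id walked_inside_anchor_bps)

-- ===== LEMMAS AND PROOFS =====
lemma pyRepeat_of_nonpos {α : Type} (xs : List α) {n : Int} (h : n ≤ 0) :
    PySem.List.pyRepeat xs n = [] := by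
  have h0 : n.toNat = 0 := Int.toNat_of_nonpos h
  simp [PySem.List.pyRepeat, h0]

lemma main_invariant (cs : List (String × Int)) (lo hi : Int) :
    ∀ (c : Int) (acc : List Char),
      getCigarGoA cs (lo - c) (hi - c) acc
        = acc ++ altJoin lo hi
            (List.zip (cs.take (altK lo hi (altStarts c cs))) (c :: altStarts c cs)) := by
  induction cs with
  | nil => intro c acc; simp [getCigarGoA, altStarts, altK, altJoin]
  | cons hd rest ih =>
    intro c acc
    obtain ⟨s, b⟩ := hd
    have harith : lo - c - b + b = lo - c := by ring
    have harith2 : hi - c - b + b = hi - c := by ring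
    by_cases hbrk : lo < c + b ∧ hi < c + b
    · have hw : lo - c - b < 0 := by omega
      have he : hi - c - b < 0 := by omega
      simp only [getCigarGoA, altStarts, altK, if_pos hbrk, if_pos hw, if_pos he,
        List.take_succ_cons, List.take_zero, List.zip_cons_cons, List.zip_nil_left,
        altJoin, harith, harith2, List.append_nil]
    · simp only [getCigarGoA, altStarts, altK, if_neg hbrk, List.take_succ_cons,
        List.zip_cons_cons, altJoin]
      by_cases hw : lo - c - b < 0
      · have he : ¬ hi - c - b < 0 := by omega
        rw [if_pos hw, if_neg he, harith, harith2]
        have : lo - c - b = lo - (c + b) := by ring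
        rw [this]
        have : hi - c - b = hi - (c + b) := by ring
        rw [this, ih (c + b)]
        simp [List.append_assoc]
      · rw [if_neg hw]
        have hb0 : min b (hi - c) - max 0 (lo - c) ≤ 0 := by omega
        rw [pyRepeat_of_nonpos _ hb0, List.nil_append]
        have : lo - c - b = lo - (c + b) := by ring
        rw [this]
        have : hi - c - b = hi - (c + b) := by ring
        rw [this, ih (c + b)]

-- ===== VERDICT (by name: the statement is the Claim_ definition above) =====
theorem get_cigar_spec : Claim_equal_get_cigar := by
  intro w cs rid a _
  unfold Spec_get_cigar get_cigar get_cigar_alt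
  have h := main_invariant cs w (w + a) 0 []
  simp only [sub_zero, List.nil_append] at h
  rw [h]
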